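-- pv_equiv track=rewrite | github.com/akira1999work-debug/kotonoha | voice_input.py | build_grouped_llm_hint
-- ===== SOURCE A (Python) =====
-- CATEGORY_LABEL = {
--     "person": "人名",
--     "project": "プロジェクト",
--     "tool": "ツール",
--     "concept": "概念",
--     "other": "その他",
-- }
--
-- def build_grouped_llm_hint(terms: list) -> str:
--     """category 別にグルーピングした LLM 用ヒントブロックを生成する。"""
--     if not terms:
--         return ""
--     groups: dict[str, list[str]] = {}
--     order: list[str] = []
--     for t in terms:
--         cat = t.get("category", "other")
--         if cat not in groups:
--             groups[cat] = []
--             order.append(cat)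
--         groups[cat].append(t["term"])
--     # 表示順: person → project → tool → concept → other、以降は出現順
--     preferred = ["person", "project", "tool", "concept", "other"]
--     ordered_cats = [c for c in preferred if c in groups] + [
--         c for c in order if c not in preferred
--     ]
--     lines = ["\n\n【このユーザーがよく使う固有名詞】"]
--     for cat in ordered_cats:
--         label = CATEGORY_LABEL.get(cat, cat)
--         lines.append(f"{label}: {'、'.join(groups[cat])}")
--     lines.append("音が近い誤認識を発見したら、上記のいずれかに修正してください。")
--     return "\n".join(lines)
-- ===== SOURCE B (Python) =====
-- CATEGORY_LABEL = {
--     "person": "人名",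
--     "project": "プロジェクト",
--     "tool": "ツール",
--     "concept": "概念",
--     "other": "その他",
-- }
--
-- def build_grouped_llm_hint(terms: list) -> str:
--     """Same hint block, built without a grouping dict: order the distinct
--     categories first, then collect each category's terms by a scan."""
--     if not terms:
--         return ""
--     seen = list(dict.fromkeys(t.get("category", "other") for t in terms))
--     preferred = ["person", "project", "tool", "concept", "other"]
--     ordered = [c for c in preferred if c in seen] + [c for c in seen if c not in preferred]
--     lines = (
--         ["\n\n【このユーザーがよく使う固有名詞】"]
--         + [
--             f"{CATEGORY_LABEL.get(c, c)}: "
--             + "、".join(t["term"] for t in terms if t.get("category", "other") == c)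
--             for c in ordered
--         ]
--         + ["音が近い誤認識を発見したら、上記のいずれかに修正してください。"]
--     )
--     return "\n".join(lines)
-- ===== Notes on version B (the rewrite author's own statement) =====
-- stated objective: alternative
-- what changed: A groups terms in one pass via a dict of lists plus an order list; B instead dedups the category sequence to get the display order and collects each category's terms by a separate filtering scan over the input.
import Mathlib
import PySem

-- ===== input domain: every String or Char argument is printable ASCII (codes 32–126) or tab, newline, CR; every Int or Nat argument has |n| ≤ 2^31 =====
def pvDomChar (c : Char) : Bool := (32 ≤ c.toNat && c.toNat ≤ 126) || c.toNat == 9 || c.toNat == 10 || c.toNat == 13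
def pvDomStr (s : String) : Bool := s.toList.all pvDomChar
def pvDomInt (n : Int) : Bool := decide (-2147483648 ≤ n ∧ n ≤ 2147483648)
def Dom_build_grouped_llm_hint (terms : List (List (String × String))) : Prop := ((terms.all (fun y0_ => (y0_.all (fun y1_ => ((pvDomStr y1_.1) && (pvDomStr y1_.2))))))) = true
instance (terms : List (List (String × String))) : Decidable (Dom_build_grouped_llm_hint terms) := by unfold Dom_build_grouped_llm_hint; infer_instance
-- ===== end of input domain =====

-- B replaces A's one-pass dict grouping by: dedup the categories in order, then one filtering scan per category (objective: alternative decomposition, same output).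

def CATEGORY_LABEL : PySem.Dict String String := PySem.Dict.ofList
  [("person", "人名"), ("project", "プロジェクト"), ("tool", "ツール"),
   ("concept", "概念"), ("other", "その他")]

-- t.get("category", "other") / t["term"] (Pre_ guarantees "term" is present, so the "" default is never used)
def pvCat (t : List (String × String)) : String := (PySem.Dict.mk t).getD "category" "other"
def pvTerm (t : List (String × String)) : String := (PySem.Dict.mk t).getD "term" ""

-- ===== PORT A =====
-- A's loop body: maintain (groups, order)
def pvStepA (st : PySem.Dict String (List String) × List String) (t : List (String × String)) :
    PySem.Dict String (List String) × List String :=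
  let cat := pvCat t
  let st := if st.1.contains cat then st else (st.1.insert cat [], st.2 ++ [cat])
  (st.1.modify cat [] (· ++ [pvTerm t]), st.2)

def build_grouped_llm_hint (terms : List (List (String × String))) : String :=
  if terms = [] then "" else
  let st := terms.foldl pvStepA (PySem.Dict.empty, [])
  let groups := st.1
  let order := st.2
  let preferred : List String := ["person", "project", "tool", "concept", "other"]
  let ordered_cats := preferred.filter (fun c => groups.contains c)
      ++ order.filter (fun c => !(preferred.contains c))
  let lines := ["\n\n【このユーザーがよく使う固有名詞】"]
  let lines := ordered_cats.foldl
    (fun ls c => ls ++ [CATEGORY_LABEL.getD c c ++ ": " ++ PySem.Str.join "、" (groups.getD c [])]) lines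
  let lines := lines ++ ["音が近い誤認識を発見したら、上記のいずれかに修正してください。"]
  PySem.Str.join "\n" lines

-- ===== PORT B =====
def build_grouped_llm_hint_alt (terms : List (List (String × String))) : String :=
  if terms = [] then "" else
  let seen := PySem.List.dedup (terms.map pvCat)
  let preferred : List String := ["person", "project", "tool", "concept", "other"]
  let ordered := preferred.filter (fun c => seen.contains c)
      ++ seen.filter (fun c => !(preferred.contains c))
  let lines := ["\n\n【このユーザーがよく使う固有名詞】"]
      ++ ordered.map (fun c =>
          CATEGORY_LABEL.getD c c ++ ": "
            ++ PySem.Str.join "、" ((terms.filter (fun t => pvCat t == c)).map pvTerm))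
      ++ ["音が近い誤認識を発見したら、上記のいずれかに修正してください。"]
  PySem.Str.join "\n" lines

-- ===== PRECONDITION & SPEC =====
-- Pre_ excludes exactly the inputs where Python A raises KeyError: a term dict without a "term" key.
def Pre_build_grouped_llm_hint (terms : List (List (String × String))) : Prop :=
  ∀ t ∈ terms, (PySem.Dict.mk t).contains "term" = true
instance (terms : List (List (String × String))) : Decidable (Pre_build_grouped_llm_hint terms) := by
  unfold Pre_build_grouped_llm_hint; infer_instance
def pvWitness_build_grouped_llm_hint : (List (List (String × String))) :=
  [[("term", "kotonoha"), ("category", "project")], [("term", "voice")]]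

def Spec_build_grouped_llm_hint (terms : List (List (String × String))) (out : String) : Prop := out = build_grouped_llm_hint_alt terms
instance (terms : List (List (String × String))) (out : String) : Decidable (Spec_build_grouped_llm_hint terms out) := by unfold Spec_build_grouped_llm_hint; infer_instance

-- ===== CLAIM (what is proved, stated in full; the proofs are below) =====
def Claim_equal_build_grouped_llm_hint : Prop := ∀ (terms : List (List (String × String))), Dom_build_grouped_llm_hint terms → Pre_build_grouped_llm_hint terms → Spec_build_grouped_llm_hint terms (build_grouped_llm_hint terms)

-- ===== LEMMAS AND PROOFS =====

-- Invariant of A's grouping loop: order is the running ordered set of categories,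
-- groups' keys are exactly order, and each key's value is the filtered term list.
theorem pvStepA_inv (terms : List (List (String × String))) :
    ∀ (g : PySem.Dict String (List String)) (ord : List String),
    (∀ c, g.contains c = decide (c ∈ ord)) →
    (terms.foldl pvStepA (g, ord)).2 = terms.foldl (fun s t => PySem.Set.add s (pvCat t)) ord ∧
    (∀ c, (terms.foldl pvStepA (g, ord)).1.contains c
        = decide (c ∈ (terms.foldl pvStepA (g, ord)).2)) ∧
    (∀ c, (terms.foldl pvStepA (g, ord)).1.getD c []
        = g.getD c [] ++ (terms.filter (fun t => pvCat t == c)).map pvTerm) := by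
  induction terms with
  | nil => exact fun g ord hk => ⟨rfl, hk, fun c => by simp⟩
  | cons t rest ih =>
    intro g ord hk
    by_cases hmem : pvCat t ∈ ord
    · have hc : g.contains (pvCat t) = true := by rw [hk]; simp [hmem]
      have hstep : pvStepA (g, ord) t = (g.modify (pvCat t) [] (· ++ [pvTerm t]), ord) := by
        simp [pvStepA, hc]
      have hk' : ∀ c, (g.modify (pvCat t) [] (· ++ [pvTerm t])).contains c = decide (c ∈ ord) := by
        intro c
        rw [PySem.Dict.contains_modify, hk]
        by_cases hce : c = pvCat t
        · subst hce; simp [hmem]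
        · simp [hce]
      obtain ⟨h2, h3, h4⟩ := ih _ _ hk'
      rw [List.foldl_cons, hstep]
      refine ⟨?_, h3, ?_⟩
      · rw [h2, List.foldl_cons]
        have : PySem.Set.add ord (pvCat t) = ord := by
          simp [PySem.Set.add, PySem.Set.contains, hmem]
        rw [this]
      · intro c
        rw [h4]
        by_cases hce : c = pvCat t
        · subst hce
          rw [PySem.Dict.getD_modify_self]
          simp
        · rw [PySem.Dict.getD_modify_of_ne _ _ _ hce]
          have : (pvCat t == c) = false := by simp [Ne.symm hce]
          simp [this]
    · have hc : g.contains (pvCat t) = false := by rw [hk]; simp [hmem]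
      have hstep : pvStepA (g, ord) t
          = ((g.insert (pvCat t) []).modify (pvCat t) [] (· ++ [pvTerm t]), ord ++ [pvCat t]) := by
        simp [pvStepA, hc]
      have hk' : ∀ c, ((g.insert (pvCat t) []).modify (pvCat t) [] (· ++ [pvTerm t])).contains c
          = decide (c ∈ ord ++ [pvCat t]) := by
        intro c
        rw [PySem.Dict.contains_modify, PySem.Dict.contains_insert, hk]
        by_cases hce : c = pvCat t <;> simp [hce]
      obtain ⟨h2, h3, h4⟩ := ih _ _ hk'
      rw [List.foldl_cons, hstep]
      refine ⟨?_, h3, ?_⟩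
      · rw [h2, List.foldl_cons]
        have : PySem.Set.add ord (pvCat t) = ord ++ [pvCat t] := by
          simp [PySem.Set.add, PySem.Set.contains, hmem]
        rw [this]
      · intro c
        rw [h4]
        by_cases hce : c = pvCat t
        · subst hce
          rw [PySem.Dict.getD_modify_self, PySem.Dict.getD_insert_self,
              PySem.Dict.getD_of_not_contains g [] hc]
          simp
        · rw [PySem.Dict.getD_modify_of_ne _ _ _ hce,
              PySem.Dict.getD_insert]
          have hne : (pvCat t == c) = false := by simp [Ne.symm hce]
          simp [hne, hce]

theorem build_grouped_llm_hint_eq (terms : List (List (String × String))) :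
    build_grouped_llm_hint terms = build_grouped_llm_hint_alt terms := by
  by_cases h : terms = []
  · subst h; rfl
  · obtain ⟨h2, h3, h4⟩ := pvStepA_inv terms PySem.Dict.empty []
      (fun c => by simp [PySem.Dict.contains_empty])
    unfold build_grouped_llm_hint build_grouped_llm_hint_alt
    rw [if_neg h, if_neg h]
    have hseen : PySem.List.dedup (terms.map pvCat)
        = (terms.foldl pvStepA (PySem.Dict.empty, [])).2 := by
      rw [PySem.List.dedup_eq_ofList, PySem.Set.ofList_eq_foldl, List.foldl_map, h2]
    have hgetD : ∀ c, (terms.foldl pvStepA (PySem.Dict.empty, [])).1.getD c []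
        = (terms.filter (fun t => pvCat t == c)).map pvTerm := by
      intro c; rw [h4 c, PySem.Dict.getD_empty]; rfl
    have hcont : ∀ c, (terms.foldl pvStepA (PySem.Dict.empty, [])).1.contains c
        = (PySem.List.dedup (terms.map pvCat)).contains c := by
      intro c; rw [h3 c, hseen, List.contains_eq_mem]
    have hfilter : List.filter (fun c => (terms.foldl pvStepA (PySem.Dict.empty, [])).1.contains c)
          ["person", "project", "tool", "concept", "other"]
        = List.filter (fun c => (terms.foldl pvStepA (PySem.Dict.empty, [])).2.contains c)
          ["person", "project", "tool", "concept", "other"] :=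
      List.filter_congr (fun c _ => by rw [h3 c, List.contains_eq_mem])
    simp only [PySem.List.foldl_append_singleton_eq_map]
    rw [hseen, hfilter]
    congr 1
    congr 1
    congr 1
    exact List.map_congr_left (fun c _ => by rw [hgetD c])

-- ===== VERDICT (by name: the statement is the Claim_ definition above) =====
theorem build_grouped_llm_hint_spec : Claim_equal_build_grouped_llm_hint := by
  intro terms _ _
  exact build_grouped_llm_hint_eq terms
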